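-- pv_equiv track=rewrite | github.com/jystella17/Algorithm | Greedy/택배 배달과 수거하기.py | solution
-- ===== SOURCE A (Python) =====
-- def solution(cap, n, deliveries, pickups):
--     answer = 0
--     # 최소 이동 거리 => 멀리 떨어진 집에 대한 배달 및 수거를 우선적으로 처리
--     # 따라서 deliveries, pickups 배열의 원소를 역순으로 정렬하여 멀리 떨어진 집을 먼저 탐색
--     deliveries = deliveries[::-1]
--     pickups = pickups[::-1]
--
--     box_deliver, box_pickup = 0, 0 # 배달/수거할 박스 개수
--     for i in range(n):
--         box_deliver += deliveries[i]
--         box_pickup += pickups[i]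
--
--         # 첫 출발을 포함해 물류 창고에 방문해야 하는 케이스
--         # box_deliver 혹은 box_pickup이 cap*2 이상인 경우,
--         # 현재 지점에서 물류 창고를 여러 번 방문해야 하므로 if가 아닌 while문 사용
--         while box_deliver > 0 or box_pickup > 0:
--             box_deliver -= cap
--             box_pickup -= cap
--             answer += (n-i) * 2 # 현재 지점~물류창고를 왕복하는 거리
--
--     return answer
-- ===== SOURCE B (Python) =====
-- def solution(cap, n, deliveries, pickups):
--     # Carry-free reformulation: per position, trips needed so far is the max of
--     # ceil-divided suffix totals; each trip from position i costs 2*(n-i), which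
--     # telescopes to adding 2*trips at every position.
--     answer = 0
--     d = p = trips = 0
--     for i in range(n):
--         d += deliveries[-1 - i]
--         p += pickups[-1 - i]
--         trips = max(trips, -(-d // cap), -(-p // cap))
--         answer += 2 * trips
--     return answer
-- ===== Notes on version B (the rewrite author's own statement) =====
-- stated objective: simpler
-- what changed: A reverses both lists and simulates warehouse trips with an inner while loop carrying leftover box counts; B makes one reverse-indexed pass keeping suffix totals and takes the per-position trip count directly as the running max of the two ceiling-divided totals, adding 2*trips per position (the per-trip distances telescope).
-- outside the precondition, e.g. on solution(-1, 1, [0], [0]): A returns 0, B returns 0; on solution(0, 1, [0], [0]): A returns 0, B raises ZeroDivisionError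
import Mathlib
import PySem

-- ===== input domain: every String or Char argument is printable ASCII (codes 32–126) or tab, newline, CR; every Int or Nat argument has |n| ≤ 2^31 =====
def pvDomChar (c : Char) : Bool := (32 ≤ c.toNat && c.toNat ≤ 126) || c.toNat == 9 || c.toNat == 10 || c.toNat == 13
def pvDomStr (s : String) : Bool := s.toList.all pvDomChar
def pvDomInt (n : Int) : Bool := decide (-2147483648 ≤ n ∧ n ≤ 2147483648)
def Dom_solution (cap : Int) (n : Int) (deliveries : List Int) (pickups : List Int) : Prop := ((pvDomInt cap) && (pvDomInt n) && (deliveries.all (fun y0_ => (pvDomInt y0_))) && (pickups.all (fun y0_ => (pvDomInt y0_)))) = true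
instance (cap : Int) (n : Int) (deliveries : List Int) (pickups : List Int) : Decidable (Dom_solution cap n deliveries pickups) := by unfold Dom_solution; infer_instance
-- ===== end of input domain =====

-- B replaces A's reversed copies and carry-based inner while loop by a single reverse-indexed
-- pass whose per-position trip count is the running max of ceil-divided suffix totals (objective: simpler).

-- ===== PORT A =====
-- the inner `while box_deliver > 0 or box_pickup > 0` loop; fuel only makes it total
-- (inside Pre_ the supplied fuel is proved sufficient, see pvWhileA_spec below)
def pvWhileA (cap w : Int) : Nat → Int × Int × Int → Int × Int × Int
  | 0, s => s
  | fuel+1, s =>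
    if 0 < s.1 ∨ 0 < s.2.1 then
      pvWhileA cap w fuel (s.1 - cap, s.2.1 - cap, s.2.2 + w * 2)
    else s

-- one iteration of A's `for i in range(n)` loop; state = (box_deliver, box_pickup, answer)
def pvStepA (cap n : Int) (ds ps : List Int) (s : Int × Int × Int) (i : Int) : Int × Int × Int :=
  let bd := s.1 + PySem.List.pyGetD ds i 0
  let bp := s.2.1 + PySem.List.pyGetD ps i 0
  pvWhileA cap (n - i) (bd.toNat + bp.toNat + 1) (bd, bp, s.2.2)

def solution (cap : Int) (n : Int) (deliveries : List Int) (pickups : List Int) : Int :=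
  let ds := (PySem.List.slice? deliveries none none (-1)).getD []   -- deliveries[::-1]
  let ps := (PySem.List.slice? pickups none none (-1)).getD []      -- pickups[::-1]
  ((PySem.List.pyRange 0 n 1).foldl (pvStepA cap n ds ps) (0, 0, 0)).2.2

-- ===== PORT B =====
-- -(-x // cap), Python's ceiling division
def pvCeilDiv (x cap : Int) : Int := -(PySem.Int.floordiv (-x) cap)

-- one iteration of B's loop; state = (d, p, trips, answer)
def pvStepB (cap : Int) (deliveries pickups : List Int) (s : Int × Int × Int × Int) (i : Int) :
    Int × Int × Int × Int :=
  let d := s.1 + PySem.List.pyGetD deliveries (-1 - i) 0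
  let p := s.2.1 + PySem.List.pyGetD pickups (-1 - i) 0
  let t := max s.2.2.1 (max (pvCeilDiv d cap) (pvCeilDiv p cap))
  (d, p, t, s.2.2.2 + 2 * t)

def solution_alt (cap : Int) (n : Int) (deliveries : List Int) (pickups : List Int) : Int :=
  ((PySem.List.pyRange 0 n 1).foldl (pvStepB cap deliveries pickups) (0, 0, 0, 0)).2.2.2

-- ===== PRECONDITION & SPEC =====
-- Pre_ excludes n larger than either list (A's indexing raises IndexError) and cap ≤ 0 with
-- n > 0, where A's while loop diverges whenever some suffix total is positive (and B would
-- divide by cap = 0); on the remaining cap ≤ 0 inputs A happens to return — see claim cites.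
def Pre_solution (cap : Int) (n : Int) (deliveries : List Int) (pickups : List Int) : Prop :=
  n ≤ (deliveries.length : Int) ∧ n ≤ (pickups.length : Int) ∧ (0 < cap ∨ n ≤ 0)
instance (cap : Int) (n : Int) (deliveries : List Int) (pickups : List Int) : Decidable (Pre_solution cap n deliveries pickups) := by unfold Pre_solution; infer_instance

def pvWitness_solution : Int × Int × List Int × List Int := (4, 2, [2, 3], [1, 5])

def Spec_solution (cap : Int) (n : Int) (deliveries : List Int) (pickups : List Int) (out : Int) : Prop := out = solution_alt cap n deliveries pickups
instance (cap : Int) (n : Int) (deliveries : List Int) (pickups : List Int) (out : Int) : Decidable (Spec_solution cap n deliveries pickups out) := by unfold Spec_solution; infer_instance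

-- ===== CLAIM (what is proved, stated in full; the proofs are below) =====
def Claim_equal_solution : Prop := ∀ (cap : Int) (n : Int) (deliveries : List Int) (pickups : List Int), Dom_solution cap n deliveries pickups → Pre_solution cap n deliveries pickups → Spec_solution cap n deliveries pickups (solution cap n deliveries pickups)

-- ===== LEMMAS AND PROOFS =====

-- ceiling division bracket: pvCeilDiv x cap ≤ t ↔ x ≤ cap * t  (cap > 0)
lemma pvCeilDiv_le_iff {cap x t : Int} (hcap : 0 < cap) :
    pvCeilDiv x cap ≤ t ↔ x ≤ cap * t := by
  unfold pvCeilDiv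
  rw [neg_le, PySem.Int.le_floordiv_iff_mul_le hcap]
  constructor <;> intro h <;> nlinarith

-- the while loop runs exactly (max t (max ceilD ceilP)) - t times
lemma pvWhileA_spec (cap w : Int) (hcap : 0 < cap) :
    ∀ (fuel : Nat) (D P t a : Int),
      max (pvCeilDiv D cap) (pvCeilDiv P cap) - t ≤ (fuel : Int) →
      pvWhileA cap w fuel (D - cap * t, P - cap * t, a) =
        (D - cap * (max t (max (pvCeilDiv D cap) (pvCeilDiv P cap))),
         P - cap * (max t (max (pvCeilDiv D cap) (pvCeilDiv P cap))),
         a + w * 2 * (max t (max (pvCeilDiv D cap) (pvCeilDiv P cap)) - t)) := by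
  intro fuel
  induction fuel with
  | zero =>
    intro D P t a hf
    have hM : max (pvCeilDiv D cap) (pvCeilDiv P cap) ≤ t := by simpa using hf
    rw [max_eq_left hM]
    simp [pvWhileA]
  | succ fuel ih =>
    intro D P t a hf
    by_cases h : 0 < D - cap * t ∨ 0 < P - cap * t
    · have hM : t + 1 ≤ max (pvCeilDiv D cap) (pvCeilDiv P cap) := by
        rcases h with h | h
        · have : ¬ pvCeilDiv D cap ≤ t := by rw [pvCeilDiv_le_iff hcap]; omega
          have := le_max_left (pvCeilDiv D cap) (pvCeilDiv P cap); omega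
        · have : ¬ pvCeilDiv P cap ≤ t := by rw [pvCeilDiv_le_iff hcap]; omega
          have := le_max_right (pvCeilDiv D cap) (pvCeilDiv P cap); omega
      have hstep : pvWhileA cap w (fuel + 1) (D - cap * t, P - cap * t, a) =
          pvWhileA cap w fuel (D - cap * (t + 1), P - cap * (t + 1), a + w * 2) := by
        rw [pvWhileA, if_pos h]
        ring_nf
      rw [hstep, ih D P (t + 1) (a + w * 2) (by omega)]
      rw [max_eq_right (by omega : t + 1 ≤ max (pvCeilDiv D cap) (pvCeilDiv P cap)),
          max_eq_right (by omega : t ≤ max (pvCeilDiv D cap) (pvCeilDiv P cap))]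
      simp only [Prod.mk.injEq]
      refine ⟨trivial, trivial, by ring⟩
    · have hq : D - cap * t ≤ 0 ∧ P - cap * t ≤ 0 := by
        constructor <;> by_contra hc <;> exact h (by omega)
      have h1 : pvCeilDiv D cap ≤ t := by rw [pvCeilDiv_le_iff hcap]; omega
      have h2 : pvCeilDiv P cap ≤ t := by rw [pvCeilDiv_le_iff hcap]; omega
      rw [max_eq_left (by omega : max (pvCeilDiv D cap) (pvCeilDiv P cap) ≤ t)]
      rw [pvWhileA, if_neg h]
      simp

-- the fuel A's port supplies is always sufficient
lemma pvFuel_ge {cap : Int} (hcap : 0 < cap) (A B t : Int) :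
    max (pvCeilDiv A cap) (pvCeilDiv B cap) - t ≤
      (((A - cap * t).toNat + (B - cap * t).toNat + 1 : Nat) : Int) := by
  have key : ∀ x : Int, pvCeilDiv x cap - t ≤ ((x - cap * t).toNat : Int) := by
    intro x
    by_cases hx : pvCeilDiv x cap ≤ t
    · have : (0:Int) ≤ ((x - cap * t).toNat : Int) := Int.natCast_nonneg _
      omega
    · have hxt : cap * t < x := by
        by_contra hc; exact hx ((pvCeilDiv_le_iff hcap).mpr (by omega))
      have hb : (1:Int) ≤ x - cap * t := by omega
      have h2 : x ≤ cap * (t + (x - cap * t)) := by nlinarith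
      have := (pvCeilDiv_le_iff hcap).mpr h2
      omega
  have k1 := key A
  have k2 := key B
  have n1 : (0:Int) ≤ ((A - cap * t).toNat : Int) := Int.natCast_nonneg _
  have n2 : (0:Int) ≤ ((B - cap * t).toNat : Int) := Int.natCast_nonneg _
  push_cast
  rcases max_cases (pvCeilDiv A cap) (pvCeilDiv B cap) with ⟨he, _⟩ | ⟨he, _⟩ <;> rw [he] <;> push_cast at k1 k2 <;> omega

-- B's fold, re-indexed over the reversed lists (pyGetD xs (-1-i) = pyGetD xs.reverse i)
def pvStepB' (cap : Int) (ds ps : List Int) (s : Int × Int × Int × Int) (i : Int) :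
    Int × Int × Int × Int :=
  let d := s.1 + PySem.List.pyGetD ds i 0
  let p := s.2.1 + PySem.List.pyGetD ps i 0
  let t := max s.2.2.1 (max (pvCeilDiv d cap) (pvCeilDiv p cap))
  (d, p, t, s.2.2.2 + 2 * t)

lemma pyGetD_neg_eq_reverse (xs : List Int) {i : Int} (h0 : 0 ≤ i) (h1 : i < (xs.length : Int)) :
    PySem.List.pyGetD xs (-1 - i) 0 = PySem.List.pyGetD xs.reverse i 0 := by
  have hlen : i.toNat < xs.length := by omega
  have hidx : (-1 - i) = -(((i.toNat + 1 : Nat)) : Int) := by push_cast; omega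
  rw [hidx, PySem.List.pyGetD_neg_natCast xs (i.toNat + 1) 0 (by omega) (by omega),
      PySem.List.pyGetD_eq_getElem xs.reverse 0 h0 (by simpa using h1),
      List.getElem_reverse]
  congr 1
  omega

lemma stepB_eq_stepB' (cap n : Int) (deliveries pickups : List Int)
    (hd : n ≤ (deliveries.length : Int)) (hp : n ≤ (pickups.length : Int))
    (s : Int × Int × Int × Int) {i : Int} (hi : i ∈ PySem.List.pyRange 0 n 1) :
    pvStepB cap deliveries pickups s i = pvStepB' cap deliveries.reverse pickups.reverse s i := by
  rw [PySem.List.mem_pyRange_one] at hi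
  unfold pvStepB pvStepB'
  rw [pyGetD_neg_eq_reverse deliveries hi.1 (by omega),
      pyGetD_neg_eq_reverse pickups hi.1 (by omega)]

-- main loop invariant: A's state is B's state with cap * trips subtracted from both boxes
-- and the answer offset 2 * (n - k) * trips
lemma pvLoop_eq (cap n : Int) (ds ps : List Int) (hcap : 0 < cap) :
    ∀ (m : Nat) (k D P t aB : Int), 0 ≤ k → k + (m : Int) = n →
      (PySem.List.pyRange k n 1).foldl (pvStepA cap n ds ps)
          (D - cap * t, P - cap * t, aB + 2 * (n - k) * t) =
        (let r := (PySem.List.pyRange k n 1).foldl (pvStepB' cap ds ps) (D, P, t, aB)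
         (r.1 - cap * r.2.2.1, r.2.1 - cap * r.2.2.1, r.2.2.2)) := by
  intro m
  induction m with
  | zero =>
    intro k D P t aB hk0 hkn
    have : n ≤ k := by omega
    rw [PySem.List.pyRange_one_eq_nil this]
    simp only [List.foldl_nil]
    have : aB + 2 * (n - k) * t = aB := by
      have : n = k := by omega
      rw [this]; ring
    rw [this]
  | succ m ih =>
    intro k D P t aB hk0 hkn
    have hklt : k < n := by omega
    rw [PySem.List.pyRange_one_cons hklt]
    simp only [List.foldl_cons]
    -- evaluate one step of A
    have hx : pvStepA cap n ds ps (D - cap * t, P - cap * t, aB + 2 * (n - k) * t) k =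
        (D + PySem.List.pyGetD ds k 0 -
           cap * max t (max (pvCeilDiv (D + PySem.List.pyGetD ds k 0) cap)
                            (pvCeilDiv (P + PySem.List.pyGetD ps k 0) cap)),
         P + PySem.List.pyGetD ps k 0 -
           cap * max t (max (pvCeilDiv (D + PySem.List.pyGetD ds k 0) cap)
                            (pvCeilDiv (P + PySem.List.pyGetD ps k 0) cap)),
         (aB + 2 * max t (max (pvCeilDiv (D + PySem.List.pyGetD ds k 0) cap)
                              (pvCeilDiv (P + PySem.List.pyGetD ps k 0) cap))) +
           2 * (n - (k + 1)) * max t (max (pvCeilDiv (D + PySem.List.pyGetD ds k 0) cap)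
                                          (pvCeilDiv (P + PySem.List.pyGetD ps k 0) cap))) := by
      unfold pvStepA
      simp only
      have e1 : D - cap * t + PySem.List.pyGetD ds k 0 =
          (D + PySem.List.pyGetD ds k 0) - cap * t := by ring
      have e2 : P - cap * t + PySem.List.pyGetD ps k 0 =
          (P + PySem.List.pyGetD ps k 0) - cap * t := by ring
      rw [e1, e2,
        pvWhileA_spec cap (n - k) hcap _ (D + PySem.List.pyGetD ds k 0)
          (P + PySem.List.pyGetD ps k 0) t (aB + 2 * (n - k) * t)
          (pvFuel_ge hcap _ _ t)]
      simp only [Prod.mk.injEq]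
      refine ⟨trivial, trivial, by ring⟩
    rw [hx, ih (k + 1) (D + PySem.List.pyGetD ds k 0) (P + PySem.List.pyGetD ps k 0)
          (max t (max (pvCeilDiv (D + PySem.List.pyGetD ds k 0) cap)
                      (pvCeilDiv (P + PySem.List.pyGetD ps k 0) cap)))
          (aB + 2 * max t (max (pvCeilDiv (D + PySem.List.pyGetD ds k 0) cap)
                               (pvCeilDiv (P + PySem.List.pyGetD ps k 0) cap)))
          (by omega) (by push_cast at hkn ⊢; omega)]
    rfl

-- ===== VERDICT (by name: the statement is the Claim_ definition above) =====
theorem solution_spec : Claim_equal_solution := by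
  intro cap n deliveries pickups _hdom hpre
  obtain ⟨hd, hp, hcap⟩ := hpre
  unfold Spec_solution solution solution_alt
  by_cases hn : n ≤ 0
  · rw [PySem.List.pyRange_one_eq_nil hn]
    simp
  · have hcap' : 0 < cap := by
      rcases hcap with h | h
      · exact h
      · omega
    rw [PySem.List.foldl_congr_mem (PySem.List.pyRange 0 n 1)
          (pvStepB cap deliveries pickups) (pvStepB' cap deliveries.reverse pickups.reverse)
          (0, 0, 0, 0)
          (fun s i hi => stepB_eq_stepB' cap n deliveries pickups hd hp s hi)]
    simp only [PySem.List.slice?_none_none_neg_one, Option.getD_some]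
    have hinit : ((0 : Int), (0 : Int), (0 : Int)) =
        ((0 : Int) - cap * 0, (0 : Int) - cap * 0, (0 : Int) + 2 * (n - 0) * 0) := by
      norm_num
    have hmain := pvLoop_eq cap n deliveries.reverse pickups.reverse hcap'
          n.toNat 0 0 0 0 0 le_rfl (by omega)
    conv_lhs => rw [hinit]
    rw [hmain]
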